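-- pv_equiv track=rewrite | github.com/wongzc/NUS_IT5001_PE_answer | solution/IT5001 2024_25 SEM1 PE1.py | final_pos_r
-- ===== SOURCE A (Python) =====
-- def final_pos_r(x,y,seq):
--     if not seq:
--         return (x,y)
--     d=seq[0]
--     if d=='W':
--         x-=1
--     if d=='E':
--         x+=1
--     if d=='N':
--         y+=1
--     if d=='S':
--         y-=1
--     return final_pos_r(x,y,seq[1:])
-- ===== SOURCE B (Python) =====
-- def final_pos_r(x, y, seq):
--     return (x - seq.count('W') + seq.count('E'),
--             y + seq.count('N') - seq.count('S'))
-- ===== Notes on version B (the rewrite author's own statement) =====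
-- stated objective: faster
-- what changed: Replaced the O(n^2) recursion (each step slices seq[1:] and recurses) by a closed form from four str.count character tallies, no recursion at all.
import Mathlib
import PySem

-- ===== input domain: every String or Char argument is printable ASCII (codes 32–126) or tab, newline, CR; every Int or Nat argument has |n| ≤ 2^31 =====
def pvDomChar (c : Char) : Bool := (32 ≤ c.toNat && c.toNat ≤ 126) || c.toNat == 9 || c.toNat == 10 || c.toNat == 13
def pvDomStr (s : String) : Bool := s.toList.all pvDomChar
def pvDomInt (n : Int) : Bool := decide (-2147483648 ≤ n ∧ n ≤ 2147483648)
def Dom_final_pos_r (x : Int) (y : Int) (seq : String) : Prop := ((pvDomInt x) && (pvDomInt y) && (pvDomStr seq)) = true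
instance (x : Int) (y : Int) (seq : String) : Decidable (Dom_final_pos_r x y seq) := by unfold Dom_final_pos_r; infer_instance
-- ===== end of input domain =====

-- B replaces A's O(n^2) slice-and-recurse with a closed form from four character counts (timed asymptotically faster).

-- ===== PORT A =====
-- A recurses on the string; ported as structural recursion on the code points,
-- where seq[0] is the head and the slice seq[1:] is the tail (exact for a nonempty string).
def finalPosRec (x : Int) (y : Int) : List Char → List Int
  | [] => [x, y]
  | d :: rest =>
    let x := if d = 'W' then x - 1 else x
    let x := if d = 'E' then x + 1 else x
    let y := if d = 'N' then y + 1 else y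
    let y := if d = 'S' then y - 1 else y
    finalPosRec x y rest

def final_pos_r (x : Int) (y : Int) (seq : String) : List Int :=
  finalPosRec x y seq.toList

-- ===== PORT B =====
def final_pos_r_alt (x : Int) (y : Int) (seq : String) : List Int :=
  [x - (PySem.Str.count seq "W" : Int) + (PySem.Str.count seq "E" : Int),
   y + (PySem.Str.count seq "N" : Int) - (PySem.Str.count seq "S" : Int)]

-- ===== PRECONDITION & SPEC =====
def Spec_final_pos_r (x : Int) (y : Int) (seq : String) (out : List Int) : Prop := out = final_pos_r_alt x y seq
instance (x : Int) (y : Int) (seq : String) (out : List Int) : Decidable (Spec_final_pos_r x y seq out) := by unfold Spec_final_pos_r; infer_instance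

-- ===== CLAIM (what is proved, stated in full; the proofs are below) =====
def Claim_equal_final_pos_r : Prop := ∀ (x : Int) (y : Int) (seq : String), Dom_final_pos_r x y seq → Spec_final_pos_r x y seq (final_pos_r x y seq)

-- ===== LEMMAS AND PROOFS =====

-- str.count with a single-character needle is the plain character count
theorem count_go_singleton (c : Char) (l : List Char) (fuel acc : Nat)
    (h : l.length ≤ fuel) :
    PySem.Chars.count.go [c] fuel l acc = acc + l.count c := by
  induction l generalizing fuel acc with
  | nil => cases fuel <;> simp [PySem.Chars.count.go]
  | cons d t ih =>
    cases fuel with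
    | zero => simp at h
    | succ n =>
      simp only [PySem.Chars.count.go, List.isPrefixOf]
      by_cases hd : c = d
      · subst hd
        simp only [beq_self_eq_true, Bool.true_and, if_pos, List.length_cons,
          List.length_nil, Nat.zero_add, List.drop_one, List.tail_cons]
        rw [ih _ _ (by simpa using Nat.le_of_succ_le_succ h)]
        simp
        omega
      · have : (c == d) = false := beq_eq_false_iff_ne.mpr hd
        simp only [this, Bool.false_and, if_neg Bool.false_ne_true]
        rw [ih _ _ (Nat.le_of_succ_le_succ h)]
        simp [Ne.symm hd]

theorem chars_count_singleton (c : Char) (l : List Char) :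
    PySem.Chars.count l [c] = l.count c := by
  simp [PySem.Chars.count, count_go_singleton c l l.length 0 le_rfl]

theorem finalPosRec_eq (cs : List Char) : ∀ (x y : Int),
    finalPosRec x y cs =
      [x - (cs.count 'W' : Int) + (cs.count 'E' : Int),
       y + (cs.count 'N' : Int) - (cs.count 'S' : Int)] := by
  induction cs with
  | nil => intro x y; simp [finalPosRec]
  | cons d t ih =>
    intro x y
    simp only [finalPosRec, ih, List.count_cons]
    by_cases hW : d = 'W' <;> by_cases hE : d = 'E' <;>
      by_cases hN : d = 'N' <;> by_cases hS : d = 'S' <;>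
      simp_all <;> omega

-- ===== VERDICT (by name: the statement is the Claim_ definition above) =====
theorem final_pos_r_spec : Claim_equal_final_pos_r := by
  intro x y seq _
  show final_pos_r x y seq = final_pos_r_alt x y seq
  simp [final_pos_r, final_pos_r_alt, finalPosRec_eq, PySem.Str.count_eq,
    chars_count_singleton]
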